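-- pv_equiv track=rewrite | github.com/MGEdata/Action_extractor | Dictionary generation/chunk_recommend.py | seed_chunk_compare
-- ===== SOURCE A (Python) =====
-- def seed_chunk_compare(seed,chunk):
--     # When the head or tail of a noun phrase in the corpus is equal to seed, we consider that it meets our requirements and its context can be involved in the pattern extraction
--     sub_seed = seed.split(" ")
--     len_sub_seed = len(sub_seed)
--     sub_chunk = chunk.split(" ")
--     check_same = 0
--     check_result = False
--     if len(sub_seed) == len(sub_chunk) == 1:
--         if sub_chunk[0].lower() == sub_seed[0].lower():
--             check_result = True
--     if len(sub_chunk) >= len_sub_seed: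
--         for sub_i in range(len_sub_seed):
--             if (sub_chunk[-sub_i-1]).lower() == (sub_seed[-sub_i-1]).lower():
--                 check_same += 1
--         if check_same == len_sub_seed:
--             check_result = True
--     check_same = 0
--     if len(sub_chunk) >= len_sub_seed:
--         for sub_i in range(len_sub_seed):
--             if (sub_chunk[sub_i]).lower() == (sub_seed[sub_i]).lower():
--                 check_same += 1
--         if check_same == len_sub_seed:
--             check_result = True
--
--     return check_result
-- ===== SOURCE B (Python) =====
-- def seed_chunk_compare(seed, chunk):
--     # String-level test: no tokenisation at all. A token-list prefix/suffix match
--     # (on split(" ") tokens, case-insensitive) holds exactly when the lowered chunk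
--     # equals the lowered seed, or extends it across a space boundary.
--     s = seed.lower()
--     c = chunk.lower()
--     return c == s or c.startswith(s + " ") or c.endswith(" " + s)
-- ===== Notes on version B (the rewrite author's own statement) =====
-- stated objective: alternative
-- what changed: B never tokenises: it lowercases both whole strings and tests chunk == seed, chunk.startswith(seed + ' ') or chunk.endswith(' ' + seed), replacing A's split-into-token-lists plus two match-counting index loops with three direct substring tests.
import Mathlib
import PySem

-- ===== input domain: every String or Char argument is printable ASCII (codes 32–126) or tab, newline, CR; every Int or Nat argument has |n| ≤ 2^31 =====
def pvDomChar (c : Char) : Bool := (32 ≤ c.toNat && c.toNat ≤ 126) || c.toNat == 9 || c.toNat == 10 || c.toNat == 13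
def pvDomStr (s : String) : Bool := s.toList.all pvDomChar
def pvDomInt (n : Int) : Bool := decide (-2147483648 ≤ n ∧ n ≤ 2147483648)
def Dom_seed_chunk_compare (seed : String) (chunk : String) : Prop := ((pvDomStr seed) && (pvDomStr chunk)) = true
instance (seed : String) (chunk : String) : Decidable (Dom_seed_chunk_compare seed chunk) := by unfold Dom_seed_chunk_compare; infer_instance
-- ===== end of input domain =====

-- B does no tokenisation at all: it lowercases both whole strings and decides by three direct
-- substring tests (equality, startswith seed+" ", endswith " "+seed), replacing A's split into
-- token lists and two match-counting index loops; objective: alternative, same cost.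

-- ===== PORT A =====
def seed_chunk_compare (seed : String) (chunk : String) : Bool :=
  let sub_seed := (PySem.Str.split? seed " ").getD []
  let len_sub_seed : Int := sub_seed.length
  let sub_chunk := (PySem.Str.split? chunk " ").getD []
  let check_same : Int := 0
  let check_result : Bool := false
  let check_result :=
    if sub_seed.length = 1 ∧ sub_chunk.length = 1 then
      if PySem.Str.lower (PySem.List.pyGetD sub_chunk 0 "") =
         PySem.Str.lower (PySem.List.pyGetD sub_seed 0 "") then true
      else check_result
    else check_result
  let check_same :=
    if (sub_chunk.length : Int) ≥ len_sub_seed then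
      (PySem.List.pyRange 0 len_sub_seed 1).foldl (fun acc sub_i =>
        if PySem.Str.lower (PySem.List.pyGetD sub_chunk (-sub_i - 1) "") =
           PySem.Str.lower (PySem.List.pyGetD sub_seed (-sub_i - 1) "") then acc + 1 else acc)
        check_same
    else check_same
  let check_result :=
    if (sub_chunk.length : Int) ≥ len_sub_seed then
      (if check_same = len_sub_seed then true else check_result)
    else check_result
  let check_same : Int := 0
  let check_same :=
    if (sub_chunk.length : Int) ≥ len_sub_seed then
      (PySem.List.pyRange 0 len_sub_seed 1).foldl (fun acc sub_i =>
        if PySem.Str.lower (PySem.List.pyGetD sub_chunk sub_i "") =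
           PySem.Str.lower (PySem.List.pyGetD sub_seed sub_i "") then acc + 1 else acc)
        check_same
    else check_same
  let check_result :=
    if (sub_chunk.length : Int) ≥ len_sub_seed then
      (if check_same = len_sub_seed then true else check_result)
    else check_result
  check_result

-- ===== PORT B =====
def seed_chunk_compare_alt (seed : String) (chunk : String) : Bool :=
  let s := PySem.Str.lower seed
  let c := PySem.Str.lower chunk
  (c == s) || PySem.Str.startswith c (s ++ " ") || PySem.Str.endswith c (" " ++ s)

-- ===== PRECONDITION & SPEC =====
def Spec_seed_chunk_compare (seed : String) (chunk : String) (out : Bool) : Prop := out = seed_chunk_compare_alt seed chunk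
instance (seed : String) (chunk : String) (out : Bool) : Decidable (Spec_seed_chunk_compare seed chunk out) := by unfold Spec_seed_chunk_compare; infer_instance

-- ===== CLAIM (what is proved, stated in full; the proofs are below) =====
def Claim_equal_seed_chunk_compare : Prop := ∀ (seed : String) (chunk : String), Dom_seed_chunk_compare seed chunk → Spec_seed_chunk_compare seed chunk (seed_chunk_compare seed chunk)

-- ===== LEMMAS AND PROOFS =====

-- a 0/1-counting loop over range(n) reaches n iff the test holds at every index
lemma pvCount_eq_iff (q : Int → Prop) [DecidablePred q] (n : Nat) :
    ((PySem.List.pyRange 0 (n : Int) 1).foldl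
      (fun acc i => if q i then acc + 1 else acc) 0 = (n : Int))
    ↔ ∀ i < n, q (i : Int) := by
  rw [show PySem.List.pyRange 0 (n : Int) 1 = PySem.List.pyRange 0 (n : Int) from rfl,
      PySem.List.pyRange_zero_natCast, List.foldl_map,
      PySem.List.foldl_ite_add_one (fun k : Nat => q (k : Int)) (List.range n) 0]
  rw [zero_add, Int.natCast_inj]
  constructor
  · intro h i hi
    have := List.countP_eq_length.mp (by simpa using h) i (List.mem_range.mpr hi)
    simpa using this
  · intro h
    rw [List.countP_eq_length.mpr]
    · simp
    · intro a ha; simpa using h a (List.mem_range.mp ha)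

lemma pvTake_eq_iff (f : String → String) (S C : List String) (h : S.length ≤ C.length) :
    ((C.map f).take S.length = S.map f)
    ↔ ∀ i, (hi : i < S.length) → f (C[i]'(by omega)) = f (S[i]'hi) := by
  constructor
  · intro he i hi
    have := congrArg (fun l => l[i]?) he
    simpa [List.getElem?_take, hi, List.getElem?_map,
           List.getElem?_eq_getElem (by omega : i < C.length),
           List.getElem?_eq_getElem hi] using this
  · intro he
    apply List.ext_getElem
    · simp [h]
    · intro i h1 h2
      have hi : i < S.length := by simpa using h2
      simpa [List.getElem_take, List.getElem_map] using he i hi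

lemma pvDrop_eq_iff (f : String → String) (S C : List String) (h : S.length ≤ C.length) :
    ((C.map f).drop (C.length - S.length) = S.map f)
    ↔ ∀ i, (hi : i < S.length) →
        f (C[C.length - (i + 1)]'(by omega)) = f (S[S.length - (i + 1)]'(by omega)) := by
  constructor
  · intro he i hi
    have := congrArg (fun l => l[S.length - 1 - i]?) he
    have hlt : C.length - S.length + (S.length - 1 - i) < C.length := by omega
    simp [List.getElem?_drop, List.getElem?_map,
          List.getElem?_eq_getElem hlt,
          List.getElem?_eq_getElem (by omega : S.length - 1 - i < S.length)] at this
    have hidx : C.length - S.length + (S.length - 1 - i) = C.length - (i + 1) := by omega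
    exact (congrArg f (getElem_congr rfl hidx hlt)).symm.trans
      (this.trans (congrArg f (getElem_congr rfl (by omega) (by omega))))
  · intro he
    apply List.ext_getElem
    · simp; omega
    · intro j h1 h2
      have hj : j < S.length := by simpa using h2
      have := he (S.length - 1 - j) (by omega)
      have h1' : C.length - S.length + j < C.length := by omega
      simp [List.getElem_drop, List.getElem_map]
      have e1 : C.length - (S.length - 1 - j + 1) = C.length - S.length + j := by omega
      have e2 : S.length - (S.length - 1 - j + 1) = j := by omega
      exact ((congrArg f (getElem_congr rfl e1 (by omega))).symm.trans this).trans
        (congrArg f (getElem_congr rfl e2 (by omega)))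

-- A's result, characterised: prefix or suffix token-list match (on lowered tokens)
lemma pvA_iff (seed chunk : String) :
    seed_chunk_compare seed chunk = true ↔
      (((PySem.Str.split? seed " ").getD []).length ≤ ((PySem.Str.split? chunk " ").getD []).length ∧
        ((((PySem.Str.split? chunk " ").getD []).map PySem.Str.lower).take
            ((PySem.Str.split? seed " ").getD []).length
          = (((PySem.Str.split? seed " ").getD []).map PySem.Str.lower))) ∨
      (((PySem.Str.split? seed " ").getD []).length ≤ ((PySem.Str.split? chunk " ").getD []).length ∧
        ((((PySem.Str.split? chunk " ").getD []).map PySem.Str.lower).drop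
            (((PySem.Str.split? chunk " ").getD []).length - ((PySem.Str.split? seed " ").getD []).length)
          = (((PySem.Str.split? seed " ").getD []).map PySem.Str.lower))) := by
  unfold seed_chunk_compare
  simp only
  generalize (PySem.Str.split? seed " ").getD [] = S
  generalize (PySem.Str.split? chunk " ").getD [] = C
  by_cases hmn : ((C.length : Int) ≥ (S.length : Int))
  · have hle : S.length ≤ C.length := by omega
    simp only [if_pos hmn]
    have hP : ((PySem.List.pyRange 0 (S.length : Int) 1).foldl
        (fun acc sub_i =>
          if PySem.Str.lower (PySem.List.pyGetD C sub_i "") =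
             PySem.Str.lower (PySem.List.pyGetD S sub_i "") then acc + 1 else acc) 0
        = (S.length : Int))
        ↔ List.take S.length (C.map PySem.Str.lower) = S.map PySem.Str.lower := by
      rw [pvCount_eq_iff (fun i => PySem.Str.lower (PySem.List.pyGetD C i "") =
            PySem.Str.lower (PySem.List.pyGetD S i "")) S.length,
          pvTake_eq_iff PySem.Str.lower S C hle]
      constructor
      · intro h i hi
        have := h i hi
        rwa [PySem.List.pyGetD_natCast, PySem.List.pyGetD_natCast,
             List.getD_eq_getElem C "" (by omega), List.getD_eq_getElem S "" hi] at this
      · intro h i hi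
        rw [PySem.List.pyGetD_natCast, PySem.List.pyGetD_natCast,
            List.getD_eq_getElem C "" (by omega), List.getD_eq_getElem S "" hi]
        exact h i hi
    have hS : ((PySem.List.pyRange 0 (S.length : Int) 1).foldl
        (fun acc sub_i =>
          if PySem.Str.lower (PySem.List.pyGetD C (-sub_i - 1) "") =
             PySem.Str.lower (PySem.List.pyGetD S (-sub_i - 1) "") then acc + 1 else acc) 0
        = (S.length : Int))
        ↔ List.drop (C.length - S.length) (C.map PySem.Str.lower) = S.map PySem.Str.lower := by
      rw [pvCount_eq_iff (fun i => PySem.Str.lower (PySem.List.pyGetD C (-i - 1) "") =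
            PySem.Str.lower (PySem.List.pyGetD S (-i - 1) "")) S.length,
          pvDrop_eq_iff PySem.Str.lower S C hle]
      have ecast : ∀ i : Nat, (-(i : Int) - 1) = -(((i + 1 : Nat) : Int)) := by
        intro i; push_cast; ring
      constructor
      · intro h i hi
        have := h i hi
        rwa [ecast i, PySem.List.pyGetD_neg_natCast C (i + 1) "" (by omega) (by omega),
             PySem.List.pyGetD_neg_natCast S (i + 1) "" (by omega) (by omega)] at this
      · intro h i hi
        rw [ecast i, PySem.List.pyGetD_neg_natCast C (i + 1) "" (by omega) (by omega),
            PySem.List.pyGetD_neg_natCast S (i + 1) "" (by omega) (by omega)]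
        exact h i hi
    have hTake0 : S.length = 0 → List.take S.length (C.map PySem.Str.lower) = S.map PySem.Str.lower := by
      intro h0
      simp [List.length_eq_zero_iff.mp h0]
    by_cases hp : ((PySem.List.pyRange 0 (S.length : Int) 1).foldl
        (fun acc sub_i =>
          if PySem.Str.lower (PySem.List.pyGetD C sub_i "") =
             PySem.Str.lower (PySem.List.pyGetD S sub_i "") then acc + 1 else acc) 0
        = (S.length : Int))
    · rw [if_pos hp]
      simp [hle, hP.mp hp]
    · have hn0 : 0 < S.length := by
        rcases Nat.eq_zero_or_pos S.length with h0 | h0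
        · exact absurd (hP.mpr (hTake0 h0)) hp
        · exact h0
      rw [if_neg hp]
      by_cases hq : ((PySem.List.pyRange 0 (S.length : Int) 1).foldl
          (fun acc sub_i =>
            if PySem.Str.lower (PySem.List.pyGetD C (-sub_i - 1) "") =
               PySem.Str.lower (PySem.List.pyGetD S (-sub_i - 1) "") then acc + 1 else acc) 0
          = (S.length : Int))
      · rw [if_pos hq]
        simp [hle, hS.mp hq]
      · rw [if_neg hq]
        have hp' : List.take S.length (C.map PySem.Str.lower) ≠ S.map PySem.Str.lower :=
          fun h => hp (hP.mpr h)
        have hq' : List.drop (C.length - S.length) (C.map PySem.Str.lower) ≠ S.map PySem.Str.lower :=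
          fun h => hq (hS.mpr h)
        split_ifs with h1 h2
        · exfalso
          apply hp
          apply hP.mpr
          apply (pvTake_eq_iff PySem.Str.lower S C hle).mpr
          intro i hi
          have hi0 : i = 0 := by omega
          subst hi0
          rwa [PySem.List.pyGetD_zero, PySem.List.pyGetD_zero,
               List.getD_eq_getElem C "" (by omega), List.getD_eq_getElem S "" (by omega)] at h2
        · simp [hp', hq']
        · simp [hp', hq']
  · have hlt : C.length < S.length := by omega
    simp only [if_neg hmn, if_neg (by omega : ¬ (S.length = 1 ∧ C.length = 1))]
    simp
    omega

-- the PySem fueled splitter is List.splitOnP on the space predicate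
lemma pvGo_spec (fuel : Nat) : ∀ (l cur : List Char) (acc : List (List Char)), l.length < fuel →
    PySem.Chars.splitOn.go [' '] fuel l cur acc
      = acc.reverse ++ (l.splitOnP (· == ' ')).modifyHead (cur.reverse ++ ·) := by
  induction fuel with
  | zero => intro l cur acc h; omega
  | succ n ih =>
    intro l cur acc h
    cases l with
    | nil =>
      rw [PySem.Chars.splitOn.go.eq_def]
      simp [List.splitOnP_nil]
    | cons c rest =>
      rw [PySem.Chars.splitOn.go.eq_def]
      rcases h' : rest.splitOnP (· == ' ') with _ | ⟨h0, t0⟩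
      · exact absurd h' (List.splitOnP_ne_nil _ rest)
      by_cases hc : c = ' '
      · subst hc
        have hpre : [' '].isPrefixOf (' ' :: rest) = true := by simp [List.isPrefixOf]
        simp only [hpre, if_pos]
        rw [show List.drop [' '].length (' ' :: rest) = rest from rfl,
            ih rest [] (List.reverse cur :: acc) (by simpa using h)]
        simp [List.splitOnP_cons, h']
      · have hpre : [' '].isPrefixOf (c :: rest) = false := by
          simp [List.isPrefixOf]
          exact fun hcc => absurd hcc.symm hc
        simp only [hpre]
        rw [if_neg (by simp)]
        rw [ih rest (c :: cur) acc (by simpa using h)]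
        have hcb : ((· == ' ') c) = false := by simpa using hc
        simp [List.splitOnP_cons, hcb, h']

lemma pvSplitOn_eq (l : List Char) :
    PySem.Chars.splitOn l [' '] = l.splitOnP (· == ' ') := by
  unfold PySem.Chars.splitOn
  rw [pvGo_spec (l.length + 1) l [] [] (by omega)]
  rcases h' : l.splitOnP (· == ' ') with _ | ⟨h0, t0⟩
  · exact absurd h' (List.splitOnP_ne_nil _ l)
  · simp

-- lowering a char is a space exactly when the char is a space
lemma pvLowerChar_space (c : Char) :
    (PySem.Chars.lowerChar c == ' ') = (c == ' ') := by
  unfold PySem.Chars.lowerChar PySem.Chars.isupper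
  split_ifs with h
  · simp only [Bool.and_eq_true, decide_eq_true_eq] at h
    have h1 : 65 ≤ c.toNat := h.1
    have h2 : c.toNat ≤ 90 := h.2
    have hvalid : (c.toNat + 32).isValidChar := by left; omega
    have hne : Char.ofNat (c.toNat + 32) ≠ ' ' := by
      intro he
      have := congrArg Char.toNat he
      rw [Char.toNat_ofNat, if_pos hvalid] at this
      have hsp : (' ').toNat = 32 := by decide
      omega
    have hne2 : c ≠ ' ' := by
      intro he
      have : c.toNat = 32 := by rw [he]; decide
      omega
    simp [hne, hne2]
  · rfl

-- splitting commutes with lowering (space is a fixed point of lowering, and nothing else lowers to it)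
lemma pvSplitOnP_map_lower (l : List Char) :
    (l.map PySem.Chars.lowerChar).splitOnP (· == ' ')
      = (l.splitOnP (· == ' ')).map (List.map PySem.Chars.lowerChar) := by
  induction l with
  | nil => simp [List.splitOnP_nil]
  | cons c rest ih =>
    rw [List.map_cons, List.splitOnP_cons, List.splitOnP_cons, pvLowerChar_space]
    by_cases hc : (c == ' ') = true
    · simp [hc, ih]
    · simp only [Bool.not_eq_true] at hc
      rcases h' : rest.splitOnP (· == ' ') with _ | ⟨h0, t0⟩
      · exact absurd h' (List.splitOnP_ne_nil _ rest)
      rw [hc]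
      simp only [if_neg (Bool.false_ne_true)]
      rw [ih, h']
      simp

lemma pvIntercalate_recover (l : List Char) :
    [' '].intercalate (l.splitOnP (· == ' ')) = l := by
  have := List.intercalate_splitOn l ' '
  simpa [List.splitOn] using this

lemma pvIntercalate_append (a b : List (List Char)) (ha : a ≠ []) (hb : b ≠ []) :
    [' '].intercalate (a ++ b) = [' '].intercalate a ++ ' ' :: [' '].intercalate b := by
  induction a with
  | nil => exact absurd rfl ha
  | cons x xs ih =>
    cases xs with
    | nil =>
      rcases hb' : b with _ | ⟨y, ys⟩
      · exact absurd hb' hb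
      · simp [List.intercalate, List.intersperse]
    | cons x' xs' =>
      have : [' '].intercalate ((x' :: xs') ++ b)
          = [' '].intercalate (x' :: xs') ++ ' ' :: [' '].intercalate b :=
        ih (by simp)
      rcases hb' : b with _ | ⟨y, ys⟩
      · exact absurd hb' hb
      · subst hb'
        simp only [List.cons_append]
        rw [show [' '].intercalate (x :: x' :: (xs' ++ y :: ys))
              = x ++ [' '] ++ [' '].intercalate (x' :: (xs' ++ y :: ys)) by
            simp [List.intercalate, List.intersperse],
          show [' '].intercalate (x :: x' :: xs')
              = x ++ [' '] ++ [' '].intercalate (x' :: xs') by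
            simp [List.intercalate, List.intersperse]]
        rw [show (x' :: (xs' ++ y :: ys)) = (x' :: xs') ++ y :: ys by simp, this]
        simp

-- the string-level prefix test is the token-level prefix match
lemma pvPrefix_iff (u v : List Char) :
    (v = u ∨ (u ++ [' ']) <+: v) ↔
      ((u.splitOnP (· == ' ')).length ≤ (v.splitOnP (· == ' ')).length ∧
        (v.splitOnP (· == ' ')).take (u.splitOnP (· == ' ')).length = u.splitOnP (· == ' ')) := by
  constructor
  · intro h
    rcases h with h | h
    · subst h
      simp
    · rcases h with ⟨r, hr⟩
      have hv : v = u ++ ' ' :: r := by rw [← hr]; simp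
      subst hv
      rw [List.splitOnP_append_cons _ _ _ _ (by simp)]
      constructor
      · simp
      · simp
  · rintro ⟨hle, htake⟩
    by_cases heq : (u.splitOnP (· == ' ')).length = (v.splitOnP (· == ' ')).length
    · have hUT : v.splitOnP (· == ' ') = u.splitOnP (· == ' ') := by
        rw [← htake, heq, List.take_length]
      have hv : v = u := by
        rw [← pvIntercalate_recover v, hUT, pvIntercalate_recover u]
      exact Or.inl hv
    · have hlt : (u.splitOnP (· == ' ')).length < (v.splitOnP (· == ' ')).length :=
        lt_of_le_of_ne hle heq
      set D := (v.splitOnP (· == ' ')).drop (u.splitOnP (· == ' ')).length with hD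
      have hsplit : v.splitOnP (· == ' ') = u.splitOnP (· == ' ') ++ D := by
        conv_lhs => rw [← List.take_append_drop (u.splitOnP (· == ' ')).length (v.splitOnP (· == ' '))]
        rw [htake]
      have hdne : D ≠ [] := by
        intro h0
        rw [hD, List.drop_eq_nil_iff] at h0
        omega
      have hv : v = u ++ ' ' :: [' '].intercalate D := by
        conv_lhs => rw [← pvIntercalate_recover v]
        rw [hsplit, pvIntercalate_append _ _ (List.splitOnP_ne_nil _ u) hdne,
            pvIntercalate_recover u]
      exact Or.inr ⟨[' '].intercalate D, by rw [hv]; simp⟩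

-- the string-level suffix test is the token-level suffix match
lemma pvSuffix_iff (u v : List Char) :
    (v = u ∨ ([' '] ++ u) <:+ v) ↔
      ((u.splitOnP (· == ' ')).length ≤ (v.splitOnP (· == ' ')).length ∧
        (v.splitOnP (· == ' ')).drop ((v.splitOnP (· == ' ')).length - (u.splitOnP (· == ' ')).length)
          = u.splitOnP (· == ' ')) := by
  constructor
  · intro h
    rcases h with h | h
    · subst h
      simp
    · rcases h with ⟨r, hr⟩
      have hv : v = r ++ ' ' :: u := by rw [← hr]; simp
      subst hv
      rw [List.splitOnP_append_cons _ _ _ _ (by simp)]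
      constructor
      · simp
      · rw [List.length_append, Nat.add_sub_cancel, List.drop_left]
  · rintro ⟨hle, hdrop⟩
    by_cases heq : (u.splitOnP (· == ' ')).length = (v.splitOnP (· == ' ')).length
    · have hUT : v.splitOnP (· == ' ') = u.splitOnP (· == ' ') := by
        rw [← hdrop, heq, Nat.sub_self, List.drop_zero]
      have hv : v = u := by
        rw [← pvIntercalate_recover v, hUT, pvIntercalate_recover u]
      exact Or.inl hv
    · have hlt : (u.splitOnP (· == ' ')).length < (v.splitOnP (· == ' ')).length :=
        lt_of_le_of_ne hle heq
      set D := (v.splitOnP (· == ' ')).take ((v.splitOnP (· == ' ')).length - (u.splitOnP (· == ' ')).length) with hD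
      have hsplit : v.splitOnP (· == ' ') = D ++ u.splitOnP (· == ' ') := by
        conv_lhs => rw [← List.take_append_drop ((v.splitOnP (· == ' ')).length - (u.splitOnP (· == ' ')).length) (v.splitOnP (· == ' '))]
        rw [hdrop]
      have hdne : D ≠ [] := by
        intro h0
        rw [hD, List.take_eq_nil_iff] at h0
        rcases h0 with h0 | h0
        · omega
        · exact absurd h0 (List.splitOnP_ne_nil _ v)
      have hv : v = [' '].intercalate D ++ ' ' :: u := by
        conv_lhs => rw [← pvIntercalate_recover v]
        rw [hsplit, pvIntercalate_append _ _ hdne (List.splitOnP_ne_nil _ u),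
            pvIntercalate_recover u]
      exact Or.inr ⟨[' '].intercalate D, by rw [hv]; simp⟩

lemma pvOfList_inj : Function.Injective String.ofList := by
  intro a b h
  rw [← String.toList_ofList (l := a), h, String.toList_ofList]

-- the String-token lists A works on, expressed through the char-level splitter
lemma pvSplit_getD (s : String) :
    (PySem.Str.split? s " ").getD [] = (s.toList.splitOnP (· == ' ')).map String.ofList := by
  unfold PySem.Str.split? PySem.Chars.split?
  rw [show (" " : String).toList = [' '] from rfl]
  simp [pvSplitOn_eq]

lemma pvMapLower (l : List Char) :
    ((l.splitOnP (· == ' ')).map String.ofList).map PySem.Str.lower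
      = ((l.map PySem.Chars.lowerChar).splitOnP (· == ' ')).map String.ofList := by
  rw [pvSplitOnP_map_lower, List.map_map, List.map_map]
  apply List.map_congr_left
  intro t _
  simp [Function.comp, PySem.Str.lower, PySem.Chars.lower]

-- ===== VERDICT (by name: the statement is the Claim_ definition above) =====
theorem seed_chunk_compare_spec : Claim_equal_seed_chunk_compare := by
  intro seed chunk _
  unfold Spec_seed_chunk_compare
  rw [Bool.eq_iff_iff, pvA_iff]
  unfold seed_chunk_compare_alt
  simp only
  -- move B to the char level
  rw [show (PySem.Str.lower chunk == PySem.Str.lower seed)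
        = ((chunk.toList.map PySem.Chars.lowerChar) == (seed.toList.map PySem.Chars.lowerChar)) by
      rw [Bool.eq_iff_iff, beq_iff_eq, beq_iff_eq]
      constructor
      · intro h
        have := congrArg String.toList h
        simpa [PySem.Str.toList_lower, PySem.Chars.lower] using this
      · intro h
        unfold PySem.Str.lower PySem.Chars.lower
        rw [h]]
  rw [PySem.Str.startswith_eq, PySem.Str.endswith_eq, String.toList_append,
      String.toList_append, PySem.Str.toList_lower, PySem.Str.toList_lower,
      show (" " : String).toList = [' '] from rfl]
  simp only [PySem.Chars.lower]
  rw [pvSplit_getD seed, pvSplit_getD chunk]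
  rw [pvMapLower, pvMapLower]
  -- abbreviations
  set s' := seed.toList.map PySem.Chars.lowerChar with hs'
  set c' := chunk.toList.map PySem.Chars.lowerChar with hc'
  have hlenS : ((seed.toList.splitOnP (· == ' ')).map String.ofList).length
      = (s'.splitOnP (· == ' ')).length := by
    rw [hs', pvSplitOnP_map_lower]; simp
  have hlenC : ((chunk.toList.splitOnP (· == ' ')).map String.ofList).length
      = (c'.splitOnP (· == ' ')).length := by
    rw [hc', pvSplitOnP_map_lower]; simp
  rw [hlenS, hlenC, ← List.map_take, ← List.map_drop,
      List.map_inj_right (fun a b h => pvOfList_inj h),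
      List.map_inj_right (fun a b h => pvOfList_inj h)]
  -- now both sides are char-level token conditions; close with the two characterisations
  rw [show PySem.Chars.startswith c' (s' ++ [' ']) = (s' ++ [' ']).isPrefixOf c' from rfl,
      show PySem.Chars.endswith c' ([' '] ++ s') = ([' '] ++ s').isSuffixOf c' from rfl]
  simp only [Bool.or_eq_true, beq_iff_eq, List.isPrefixOf_iff_prefix, List.isSuffixOf_iff_suffix]
  constructor
  · rintro (h | h)
    · exact Or.inl (by simpa using (pvPrefix_iff s' c').mpr h)
    · rcases (pvSuffix_iff s' c').mpr h with h | h
      · exact Or.inl (Or.inl h)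
      · exact Or.inr h
  · rintro ((h | h) | h)
    · exact Or.inl ((pvPrefix_iff s' c').mp (Or.inl h))
    · exact Or.inl ((pvPrefix_iff s' c').mp (Or.inr h))
    · exact Or.inr ((pvSuffix_iff s' c').mp (Or.inr h))
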